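-- pv_equiv track=rewrite | github.com/lalmei/puzzletree | tests/test_reconstruct_shredder.py | placement_neighbors
-- ===== SOURCE A (Python) =====
-- def placement_neighbors(coords_by_id: dict[int, tuple[int, int]]) -> set[tuple[int, int]]:
--     ids = sorted(coords_by_id)
--     out = set()
--     for i, a in enumerate(ids):
--         xa, ya = coords_by_id[a]
--         for b in ids[i + 1 :]:
--             xb, yb = coords_by_id[b]
--             if abs(xa - xb) + abs(ya - yb) == 1:
--                 out.add((a, b))
--     return out
-- ===== SOURCE B (Python) =====
-- def _bisect_right(ids, a):
--     lo, hi = 0, len(ids)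
--     while lo < hi:
--         mid = (lo + hi) // 2
--         if a < ids[mid]:
--             hi = mid
--         else:
--             lo = mid + 1
--     return lo
--
--
-- def placement_neighbors(coords_by_id: dict[int, tuple[int, int]]) -> set[tuple[int, int]]:
--     cell = {}
--     for i in sorted(coords_by_id):
--         cell.setdefault(coords_by_id[i], []).append(i)
--     pairs = []
--     for a in sorted(coords_by_id):
--         x, y = coords_by_id[a]
--         cand = []
--         for c in ((x - 1, y), (x + 1, y), (x, y - 1), (x, y + 1)):
--             ids = cell.get(c, [])
--             cand.extend(ids[_bisect_right(ids, a):])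
--         cand.sort()
--         pairs.extend([(a, b) for b in cand])
--     return set(pairs)
-- ===== Notes on version B (the rewrite author's own statement) =====
-- stated objective: alternative
-- what changed: Replaces the all-pairs double loop with a coordinate-to-sorted-ids hash map: each point probes only its 4 Manhattan-distance-1 neighbor cells and takes the bisected tail of larger ids (output-sensitive instead of scanning all pairs).
import Mathlib
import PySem

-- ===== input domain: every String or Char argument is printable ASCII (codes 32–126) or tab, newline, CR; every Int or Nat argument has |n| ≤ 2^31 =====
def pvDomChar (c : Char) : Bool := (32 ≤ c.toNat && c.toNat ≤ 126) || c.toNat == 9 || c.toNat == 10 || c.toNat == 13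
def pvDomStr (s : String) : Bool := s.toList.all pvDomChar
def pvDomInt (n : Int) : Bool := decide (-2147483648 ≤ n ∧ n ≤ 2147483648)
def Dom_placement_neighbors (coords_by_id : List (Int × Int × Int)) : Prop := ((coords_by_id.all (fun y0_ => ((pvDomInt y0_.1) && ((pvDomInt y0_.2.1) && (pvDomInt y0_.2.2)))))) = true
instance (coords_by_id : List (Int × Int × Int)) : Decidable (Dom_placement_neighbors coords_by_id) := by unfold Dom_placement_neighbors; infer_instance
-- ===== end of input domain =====

-- B replaces A's all-pairs scan by a coordinate-to-sorted-ids map probed at the 4 neighbor cells, taking the bisected tail of larger ids per cell (objective: alternative).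


-- ===== PORT A =====
def placement_neighbors (coords_by_id : List (Int × Int × Int)) : List (Int × Int) :=
  let d : PySem.Dict Int (Int × Int) := PySem.Dict.update PySem.Dict.empty coords_by_id
  let ids := PySem.List.sorted d.keys (fun x => x) false
  (PySem.List.enumerate ids 0).foldl (fun out ia =>
    let a := ia.2
    let xya := d.getD a (0, 0)
    (PySem.List.slice ids (some (ia.1 + 1)) none).foldl (fun out b =>
      let xyb := d.getD b (0, 0)
      if |xya.1 - xyb.1| + |xya.2 - xyb.2| = 1 then PySem.Set.add out (a, b) else out) out)
    PySem.Set.empty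

-- ===== PORT B =====
-- _bisect_right in Source B is CPython's bisect_right loop, ported as PySem.List.bisectRight
def placement_neighbors_alt (coords_by_id : List (Int × Int × Int)) : List (Int × Int) :=
  let d : PySem.Dict Int (Int × Int) := PySem.Dict.update PySem.Dict.empty coords_by_id
  let cell : PySem.Dict (Int × Int) (List Int) :=
    (PySem.List.sorted d.keys (fun x => x) false).foldl
      (fun cell i => cell.modify (d.getD i (0, 0)) [] (· ++ [i])) PySem.Dict.empty
  let pairs := (PySem.List.sorted d.keys (fun x => x) false).foldl (fun pairs a =>
    let xy := d.getD a (0, 0)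
    let cand := [(xy.1 - 1, xy.2), (xy.1 + 1, xy.2), (xy.1, xy.2 - 1), (xy.1, xy.2 + 1)].foldl
      (fun cand c =>
        let ids := cell.getD c []
        cand ++ PySem.List.slice ids (some ((PySem.List.bisectRight ids a : Nat) : Int)) none) []
    pairs ++ (PySem.List.sorted cand (fun x => x) false).map (fun b => (a, b))) []
  PySem.Set.ofList pairs

-- ===== PRECONDITION & SPEC =====
def Spec_placement_neighbors (coords_by_id : List (Int × Int × Int)) (out : List (Int × Int)) : Prop := out = placement_neighbors_alt coords_by_id
instance (coords_by_id : List (Int × Int × Int)) (out : List (Int × Int)) : Decidable (Spec_placement_neighbors coords_by_id out) := by unfold Spec_placement_neighbors; infer_instance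

-- ===== CLAIM (what is proved, stated in full; the proofs are below) =====
def Claim_equal_placement_neighbors : Prop := ∀ (coords_by_id : List (Int × Int × Int)), Dom_placement_neighbors coords_by_id → Spec_placement_neighbors coords_by_id (placement_neighbors coords_by_id)

-- ===== LEMMAS AND PROOFS =====

-- A's loop body for a fixed outer id `a`
def pvStepA (d : PySem.Dict Int (Int × Int)) (a : Int) (out : PySem.Set (Int × Int)) (b : Int) :
    PySem.Set (Int × Int) :=
  let xya := d.getD a (0, 0)
  let xyb := d.getD b (0, 0)
  if |xya.1 - xyb.1| + |xya.2 - xyb.2| = 1 then PySem.Set.add out (a, b) else out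

-- A's double loop rephrased as structural recursion over the suffix list
def pvGoA (d : PySem.Dict Int (Int × Int)) : List Int → PySem.Set (Int × Int) → PySem.Set (Int × Int)
  | [], out => out
  | a :: rest, out => pvGoA d rest (rest.foldl (pvStepA d a) out)

def pvIds (d : PySem.Dict Int (Int × Int)) : List Int :=
  PySem.List.sorted d.keys (fun x => x) false

def pvCell (d : PySem.Dict Int (Int × Int)) : PySem.Dict (Int × Int) (List Int) :=
  (pvIds d).foldl (fun cell i => cell.modify (d.getD i (0, 0)) [] (· ++ [i])) PySem.Dict.empty

def pvTail (d : PySem.Dict Int (Int × Int)) (a : Int) (c : Int × Int) : List Int :=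
  let ids := (pvCell d).getD c []
  PySem.List.slice ids (some ((PySem.List.bisectRight ids a : Nat) : Int)) none

def pvCand (d : PySem.Dict Int (Int × Int)) (a : Int) : List Int :=
  let xy := d.getD a (0, 0)
  [(xy.1 - 1, xy.2), (xy.1 + 1, xy.2), (xy.1, xy.2 - 1), (xy.1, xy.2 + 1)].foldl
    (fun cand c => cand ++ pvTail d a c) []

-- B's pair block for a fixed id `a` (in ascending b)
def pvBlock (d : PySem.Dict Int (Int × Int)) (a : Int) : List (Int × Int) :=
  (PySem.List.sorted (pvCand d a) (fun x => x) false).map (fun b => (a, b))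

-- a fold with a guarded body is the fold of the guard's filter
theorem pv_foldl_if {α β : Type} (l : List β) (p : β → Prop) [DecidablePred p]
    (g : α → β → α) (init : α) :
    l.foldl (fun acc x => if p x then g acc x else acc) init
      = (l.filter (fun x => decide (p x))).foldl g init := by
  induction l generalizing init with
  | nil => rfl
  | cons x t ih => by_cases h : p x <;> simp [h, ih]

theorem pv_eq_of_pairwise_lt (X Y : List Int) (hX : X.Pairwise (· < ·))
    (hY : Y.Pairwise (· < ·)) (hm : ∀ b, b ∈ X ↔ b ∈ Y) : X = Y := by
  have hperm : Y.Perm X := (List.perm_ext_iff_of_nodup hY.nodup hX.nodup).2 (fun b => (hm b).symm)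
  have h1 := PySem.List.sorted_eq_of_perm_of_pairwise_lt X X (fun x => x) (List.Perm.refl X) hX
  have h2 := PySem.List.sorted_eq_of_perm_of_pairwise_lt X Y (fun x => x) hperm hY
  rw [← h1, h2]

theorem pvDist1_iff (u v : Int × Int) :
    |u.1 - v.1| + |u.2 - v.2| = 1 ↔
      (v = (u.1 - 1, u.2) ∨ v = (u.1 + 1, u.2) ∨ v = (u.1, u.2 - 1) ∨ v = (u.1, u.2 + 1)) := by
  obtain ⟨x, y⟩ := u; obtain ⟨p, q⟩ := v
  simp only [Prod.mk.injEq, Int.abs_eq_natAbs]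
  omega

theorem pvCell_getD (d : PySem.Dict Int (Int × Int)) (c : Int × Int) :
    (pvCell d).getD c [] = (pvIds d).filter (fun i => d.getD i (0, 0) == c) := by
  unfold pvCell
  have h : (pvIds d).foldl (fun cell i => cell.modify (d.getD i (0, 0)) [] (· ++ [i]))
        (PySem.Dict.empty : PySem.Dict (Int × Int) (List Int))
      = ((pvIds d).map (fun i => (d.getD i (0, 0), i))).foldl
          (fun cell q => cell.modify q.1 [] (· ++ [q.2])) PySem.Dict.empty := by
    rw [List.foldl_map]
  rw [h, PySem.Dict.getD_foldl_modify_append]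
  simp [List.filter_map, Function.comp_def]

theorem mem_pvCellList (d : PySem.Dict Int (Int × Int)) (b : Int) (c : Int × Int) :
    b ∈ (pvCell d).getD c [] ↔ b ∈ pvIds d ∧ d.getD b (0, 0) = c := by
  rw [pvCell_getD]
  simp [List.mem_filter]

theorem pairwise_lt_pvCellList (d : PySem.Dict Int (Int × Int))
    (hlt : (pvIds d).Pairwise (· < ·)) (c : Int × Int) :
    ((pvCell d).getD c []).Pairwise (· < ·) := by
  rw [pvCell_getD]
  exact hlt.filter _

theorem pv_drop_bisect (L : List Int) (a : Int) (hle : L.Pairwise (· ≤ ·)) :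
    L.drop (PySem.List.bisectRight L a) = L.filter (fun b => decide (a < b)) := by
  obtain ⟨hk, hlo, hhi⟩ := PySem.List.bisectRight_spec L a hle
  have h1 : (L.take (PySem.List.bisectRight L a)).filter (fun b => decide (a < b)) = [] := by
    rw [List.filter_eq_nil_iff]
    intro b hb
    obtain ⟨j, hj, hbj⟩ := List.mem_iff_getElem.1 hb
    have hjk : j < PySem.List.bisectRight L a := by
      have := hj; simp [List.length_take] at this; omega
    have hjL : j < L.length := by
      have := hj; simp [List.length_take] at this; omega
    have hget : (L.take (PySem.List.bisectRight L a))[j] = L[j] := List.getElem_take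
    rw [hget] at hbj
    subst hbj
    simpa using not_lt_of_ge (hlo j hjL hjk)
  have h2 : (L.drop (PySem.List.bisectRight L a)).filter (fun b => decide (a < b))
      = L.drop (PySem.List.bisectRight L a) := by
    rw [List.filter_eq_self]
    intro b hb
    obtain ⟨j, hj, hbj⟩ := List.mem_iff_getElem.1 hb
    have hjL : PySem.List.bisectRight L a + j < L.length := by
      have := hj; simp [List.length_drop] at this; omega
    have hget : (L.drop (PySem.List.bisectRight L a))[j] = L[PySem.List.bisectRight L a + j] :=
      List.getElem_drop
    rw [hget] at hbj
    subst hbj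
    simpa using hhi _ hjL (Nat.le_add_right _ _)
  conv_rhs => rw [← List.take_append_drop (PySem.List.bisectRight L a) L]
  rw [List.filter_append, h1, h2, List.nil_append]

theorem pvTail_eq (d : PySem.Dict Int (Int × Int)) (hlt : (pvIds d).Pairwise (· < ·))
    (a : Int) (c : Int × Int) :
    pvTail d a c = ((pvCell d).getD c []).filter (fun b => decide (a < b)) := by
  unfold pvTail
  rw [PySem.List.slice_from_natCast]
  exact pv_drop_bisect _ a ((pairwise_lt_pvCellList d hlt c).imp le_of_lt)

theorem mem_pvCand (d : PySem.Dict Int (Int × Int)) (hlt : (pvIds d).Pairwise (· < ·))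
    (a b : Int) :
    b ∈ pvCand d a ↔ (b ∈ pvIds d ∧ a < b) ∧
      |(d.getD a (0, 0)).1 - (d.getD b (0, 0)).1| + |(d.getD a (0, 0)).2 - (d.getD b (0, 0)).2| = 1 := by
  unfold pvCand
  simp only [List.foldl_cons, List.foldl_nil, List.nil_append, List.mem_append,
    pvTail_eq d hlt, List.mem_filter, mem_pvCellList, decide_eq_true_eq]
  rw [pvDist1_iff (d.getD a (0, 0)) (d.getD b (0, 0))]
  constructor
  · rintro (((⟨⟨hi, hc⟩, hab⟩ | ⟨⟨hi, hc⟩, hab⟩) | ⟨⟨hi, hc⟩, hab⟩) | ⟨⟨hi, hc⟩, hab⟩) <;>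
      exact ⟨⟨hi, hab⟩, by tauto⟩
  · rintro ⟨⟨hi, hab⟩, hc | hc | hc | hc⟩ <;> tauto

theorem nodup_pvCand (d : PySem.Dict Int (Int × Int)) (hlt : (pvIds d).Pairwise (· < ·))
    (a : Int) : (pvCand d a).Nodup := by
  unfold pvCand
  simp only [List.foldl_cons, List.foldl_nil, List.nil_append]
  have hG : ∀ c, (pvTail d a c).Nodup := fun c => by
    rw [pvTail_eq d hlt]
    exact ((pairwise_lt_pvCellList d hlt c).nodup).filter _
  have hdis : ∀ (c c' : Int × Int) (b b' : Int), b ∈ pvTail d a c →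
      b' ∈ pvTail d a c' → c ≠ c' → b ≠ b' := by
    intro c c' b b' hb hb' hne heq
    subst heq
    rw [pvTail_eq d hlt, List.mem_filter, mem_pvCellList] at hb hb'
    exact hne (hb.1.2.symm.trans hb'.1.2)
  simp only [List.nodup_append]
  refine ⟨⟨⟨hG _, hG _, fun b hb b' hb' => hdis _ _ _ _ hb hb'
      (by intro hh; simp only [Prod.mk.injEq] at hh; omega)⟩, hG _, ?_⟩, hG _, ?_⟩
  · intro b hb b' hb'
    rcases List.mem_append.1 hb with h | h
    · exact hdis _ _ _ _ h hb' (by intro hh; simp only [Prod.mk.injEq] at hh; omega)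
    · exact hdis _ _ _ _ h hb' (by intro hh; simp only [Prod.mk.injEq] at hh; omega)
  · intro b hb b' hb'
    rcases List.mem_append.1 hb with h12 | h3
    · rcases List.mem_append.1 h12 with h | h
      · exact hdis _ _ _ _ h hb' (by intro hh; simp only [Prod.mk.injEq] at hh; omega)
      · exact hdis _ _ _ _ h hb' (by intro hh; simp only [Prod.mk.injEq] at hh; omega)
    · exact hdis _ _ _ _ h3 hb' (by intro hh; simp only [Prod.mk.injEq] at hh; omega)

theorem pv_step (d : PySem.Dict Int (Int × Int)) (hlt : (pvIds d).Pairwise (· < ·)) (a : Int)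
    (rest : List Int) (out : PySem.Set (Int × Int))
    (hmem : ∀ b, b ∈ rest ↔ b ∈ pvIds d ∧ a < b) (hp : rest.Pairwise (· < ·)) :
    rest.foldl (pvStepA d a) out = (pvBlock d a).foldl PySem.Set.add out := by
  have hA : rest.foldl (pvStepA d a) out
      = (rest.filter (fun b => decide
          (|(d.getD a (0, 0)).1 - (d.getD b (0, 0)).1|
            + |(d.getD a (0, 0)).2 - (d.getD b (0, 0)).2| = 1))).foldl
          (fun out b => PySem.Set.add out (a, b)) out :=
    pv_foldl_if rest _ _ out
  have hB : (pvBlock d a).foldl PySem.Set.add out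
      = (PySem.List.sorted (pvCand d a) (fun x => x) false).foldl
          (fun out b => PySem.Set.add out (a, b)) out := by
    unfold pvBlock
    rw [List.foldl_map]
  rw [hA, hB]
  have hsorted_lt : (PySem.List.sorted (pvCand d a) (fun x => x) false).Pairwise (· < ·) := by
    have hle := PySem.List.sorted_pairwise (pvCand d a) (fun x => x)
    have hnd' : (PySem.List.sorted (pvCand d a) (fun x => x) false).Nodup :=
      (PySem.List.sorted_perm (pvCand d a) (fun x => x) false).nodup_iff.2 (nodup_pvCand d hlt a)
    exact (hle.and hnd').imp (fun h => lt_of_le_of_ne h.1 h.2)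
  have hfilters : rest.filter (fun b => decide
          (|(d.getD a (0, 0)).1 - (d.getD b (0, 0)).1|
            + |(d.getD a (0, 0)).2 - (d.getD b (0, 0)).2| = 1))
      = PySem.List.sorted (pvCand d a) (fun x => x) false := by
    apply pv_eq_of_pairwise_lt
    · exact hp.filter _
    · exact hsorted_lt
    · intro b
      simp only [List.mem_filter, PySem.List.mem_sorted, decide_eq_true_eq]
      rw [hmem b, mem_pvCand d hlt a b]
  rw [hfilters]

theorem pv_main (d : PySem.Dict Int (Int × Int)) (hlt : (pvIds d).Pairwise (· < ·)) :
    ∀ (l : List Int) (out : PySem.Set (Int × Int)), l.Pairwise (· < ·) →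
      (∀ b ∈ l, b ∈ pvIds d) →
      (∀ b a', b ∈ pvIds d → a' ∈ l → a' < b → b ∈ l) →
      pvGoA d l out = (l.flatMap (pvBlock d)).foldl PySem.Set.add out := by
  intro l
  induction l with
  | nil => intro out _ _ _; rfl
  | cons a rest ih =>
    intro out hp hsub hcl
    have hpc := List.pairwise_cons.1 hp
    have hmem : ∀ b, b ∈ rest ↔ b ∈ pvIds d ∧ a < b := by
      intro b
      constructor
      · intro hb; exact ⟨hsub b (List.mem_cons_of_mem _ hb), hpc.1 b hb⟩
      · rintro ⟨hk, hab⟩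
        rcases List.mem_cons.1 (hcl b a hk List.mem_cons_self hab) with h | h
        · omega
        · exact h
    have hstep := pv_step d hlt a rest out hmem hpc.2
    calc pvGoA d (a :: rest) out = pvGoA d rest (rest.foldl (pvStepA d a) out) := rfl
      _ = pvGoA d rest ((pvBlock d a).foldl PySem.Set.add out) := by rw [hstep]
      _ = (rest.flatMap (pvBlock d)).foldl PySem.Set.add ((pvBlock d a).foldl PySem.Set.add out) := by
          refine ih _ hpc.2 (fun b hb => hsub b (List.mem_cons_of_mem _ hb)) ?_
          intro b a' hk ha' hlt'
          rcases List.mem_cons.1 (hcl b a' hk (List.mem_cons_of_mem _ ha') hlt') with h | h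
          · exact absurd hlt' (by rw [h]; exact not_lt_of_gt (hpc.1 a' ha'))
          · exact h
      _ = ((a :: rest).flatMap (pvBlock d)).foldl PySem.Set.add out := by
          rw [List.flatMap_cons, List.foldl_append]

-- A's enumerate/slice double loop is the structural recursion pvGoA
theorem pvA_enum (d : PySem.Dict Int (Int × Int)) (L : List Int) :
    ∀ (suf : List Int) (n : Nat) (out : PySem.Set (Int × Int)), L.drop n = suf →
      (PySem.List.enumerate suf (n : Int)).foldl (fun out ia =>
        (PySem.List.slice L (some (ia.1 + 1)) none).foldl (pvStepA d ia.2) out) out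
      = pvGoA d suf out := by
  intro suf
  induction suf with
  | nil => intro n out _; rfl
  | cons a rest ih =>
    intro n out h
    simp only [PySem.List.enumerate_cons, List.foldl_cons]
    have h1 : ((n : Int) + 1) = ((n + 1 : Nat) : Int) := by push_cast; ring
    have hdrop : L.drop (n + 1) = rest := by
      have h2 : L.drop (n + 1) = (L.drop n).drop 1 := by rw [List.drop_drop, Nat.add_comm]
      rw [h2, h]
      rfl
    rw [h1, PySem.List.slice_from_natCast, hdrop]
    rw [show pvGoA d (a :: rest) out = pvGoA d rest (rest.foldl (pvStepA d a) out) from rfl]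
    exact ih (n + 1) _ hdrop

-- ===== VERDICT (by name: the statement is the Claim_ definition above) =====
theorem placement_neighbors_spec : Claim_equal_placement_neighbors := by
  intro cbi _
  unfold Spec_placement_neighbors
  have hnd : (PySem.Dict.update (PySem.Dict.empty : PySem.Dict Int (Int × Int)) cbi).keys.Nodup :=
    PySem.Dict.nodup_keys_update _ _ PySem.Dict.nodup_keys_empty
  set d := PySem.Dict.update (PySem.Dict.empty : PySem.Dict Int (Int × Int)) cbi with hd
  have hlt : (pvIds d).Pairwise (· < ·) := by
    have hle := PySem.List.sorted_pairwise d.keys (fun x => x)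
    have hnd' : (pvIds d).Nodup :=
      (PySem.List.sorted_perm d.keys (fun x => x) false).nodup_iff.2 hnd
    exact (hle.and hnd').imp (fun h => lt_of_le_of_ne h.1 h.2)
  have hA : placement_neighbors cbi = pvGoA d (pvIds d) PySem.Set.empty :=
    pvA_enum d (pvIds d) (pvIds d) 0 PySem.Set.empty (by simp)
  have hmain := pv_main d hlt (pvIds d) PySem.Set.empty hlt
    (fun b hb => hb) (fun b a' hk _ _ => hk)
  have hB : placement_neighbors_alt cbi
      = PySem.Set.ofList ((pvIds d).foldl (fun ps a => ps ++ pvBlock d a) []) := rfl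
  rw [hA, hB, hmain, PySem.List.foldl_append_eq_flatMap, List.nil_append,
    PySem.Set.ofList_eq_foldl]
  rfl
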